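-- pv_equiv track=rewrite | github.com/LucasPayne/python_math | triangle_subdiv.py | deboor_to_bezier_knot_mask
-- ===== SOURCE A (Python) =====
-- import itertools
--
-- def deboor_to_bezier_knot_mask(top_index, mask_extent):
--     top_index = list(top_index)
--     knot_mask = [tuple(top_index)]
--     for depth in range(1, mask_extent+1):
--         base_index = top_index[:]
--         base_index[0] -= depth
--         for comb in itertools.combinations_with_replacement(range(1, len(top_index)), depth):
--             index = base_index[:]
--             for i in comb:
--                 index[i] += 1
--             knot_mask.append(tuple(index))
--     return knot_mask
-- ===== SOURCE B (Python) =====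
-- def deboor_to_bezier_knot_mask(top_index, mask_extent):
--     top = list(top_index)
--     out = [tuple(top)]
--     for depth in range(1, mask_extent + 1):
--         base = top[:]
--         base[0] -= depth
--         _distribute(base, 1, depth, out)
--     return out
--
-- def _distribute(base, pos, remaining, out):
--     # distribute `remaining` increments among positions pos..len(base)-1,
--     # highest count on the leftmost position first (matches lexicographic
--     # combinations_with_replacement order)
--     n = len(base)
--     if pos >= n:
--         if remaining == 0:
--             out.append(tuple(base))
--         return
--     if pos == n - 1:
--         idx = base[:]
--         idx[pos] += remaining
--         out.append(tuple(idx))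
--         return
--     for c in range(remaining, -1, -1):
--         idx = base[:]
--         idx[pos] += c
--         _distribute(idx, pos + 1, remaining - c, out)
-- ===== Notes on version B (the rewrite author's own statement) =====
-- stated objective: alternative
-- what changed: Replaces itertools.combinations_with_replacement (a multiset of chosen positions replayed as unit increments) by a recursive stars-and-bars enumeration that assigns each position a count directly, descending so the emission order matches the lexicographic order exactly.
import Mathlib
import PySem

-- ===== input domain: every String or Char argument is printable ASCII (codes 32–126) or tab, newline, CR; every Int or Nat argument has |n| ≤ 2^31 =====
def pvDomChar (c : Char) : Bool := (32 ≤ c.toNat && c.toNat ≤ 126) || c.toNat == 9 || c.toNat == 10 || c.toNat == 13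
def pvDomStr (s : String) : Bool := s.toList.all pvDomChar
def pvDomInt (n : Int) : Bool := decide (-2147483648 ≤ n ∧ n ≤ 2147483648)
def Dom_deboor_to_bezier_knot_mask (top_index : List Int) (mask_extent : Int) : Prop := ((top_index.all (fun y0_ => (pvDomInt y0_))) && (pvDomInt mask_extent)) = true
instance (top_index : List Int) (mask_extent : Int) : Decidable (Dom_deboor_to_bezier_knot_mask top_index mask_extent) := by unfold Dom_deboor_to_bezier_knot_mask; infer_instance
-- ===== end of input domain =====

-- B replaces the combinations_with_replacement multiset enumeration by a recursive
-- stars-and-bars (count-per-position) enumeration; objective: alternative decomposition.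

-- ===== PORT A =====

-- index[i] += 1 ; exact for the indices this program uses (i is drawn from range(1, len(index)),
-- so always nonnegative and in range; Python's negative-index wraparound is never exercised)
def incAt : List Int → Int → List Int
  | [], _ => []
  | x :: xs, i => if i = 0 then (x + 1) :: xs else x :: incAt xs (i - 1)

-- hand port of itertools.combinations_with_replacement(xs, r): all nondecreasing-by-position
-- selections of r elements of xs with repetition, in CPython's lexicographic order
def cwr {α : Type} : List α → Nat → List (List α)
  | _, 0 => [[]]
  | [], _ + 1 => []
  | x :: rest, r + 1 => (cwr (x :: rest) r).map (fun c => x :: c) ++ cwr rest (r + 1)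
termination_by xs r => (r, xs.length)

def deboor_to_bezier_knot_mask (top_index : List Int) (mask_extent : Int) : List (List Int) :=
  (PySem.List.pyRange 1 (mask_extent + 1) 1).foldl (fun knot_mask depth =>
    -- base_index = top_index[:]; base_index[0] -= depth  (top_index ≠ [] whenever the
    -- loop body runs, by Pre_; Python raises IndexError on [] there)
    let base_index : List Int :=
      match top_index with
      | [] => []
      | t :: ts => (t - depth) :: ts
    -- depth ranges over 1..mask_extent, so depth ≥ 1 and depth.toNat is exact
    (cwr (PySem.List.pyRange 1 (top_index.length : Int) 1) depth.toNat).foldl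
      (fun km comb => km ++ [comb.foldl incAt base_index]) knot_mask)
    [top_index]

-- ===== PORT B =====

-- idx[i] += v ; same indexing domain remark as incAt
def addAt : List Int → Int → Int → List Int
  | [], _, _ => []
  | x :: xs, i, v => if i = 0 then (x + v) :: xs else x :: addAt xs (i - 1) v

theorem addAt_length (l : List Int) (i v : Int) : (addAt l i v).length = l.length := by
  induction l generalizing i with
  | nil => rfl
  | cons x xs ih => simp only [addAt]; split <;> simp [ih]

-- port of _distribute (returns the appended tuples instead of mutating `out`)
def distribute (base : List Int) (pos : Int) (remaining : Int) : List (List Int) :=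
  if _h1 : (base.length : Int) ≤ pos then
    if remaining = 0 then [base] else []
  else if pos = (base.length : Int) - 1 then
    [addAt base pos remaining]
  else
    (PySem.List.pyRange remaining (-1) (-1)).foldl
      (fun acc c => acc ++ distribute (addAt base pos c) (pos + 1) (remaining - c)) []
termination_by ((base.length : Int) + 1 - pos).toNat
decreasing_by
  simp only [addAt_length]
  omega

def deboor_to_bezier_knot_mask_alt (top_index : List Int) (mask_extent : Int) : List (List Int) :=
  (PySem.List.pyRange 1 (mask_extent + 1) 1).foldl (fun out depth =>
    let base : List Int :=
      match top_index with
      | [] => []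
      | t :: ts => (t - depth) :: ts
    out ++ distribute base 1 depth) [top_index]

-- ===== PRECONDITION & SPEC =====
-- Pre_ excludes only the inputs where Python A raises IndexError (base_index[0] on an
-- empty top_index, reached exactly when mask_extent ≥ 1); B raises there too.
def Pre_deboor_to_bezier_knot_mask (top_index : List Int) (mask_extent : Int) : Prop :=
  top_index ≠ [] ∨ mask_extent ≤ 0
instance (top_index : List Int) (mask_extent : Int) : Decidable (Pre_deboor_to_bezier_knot_mask top_index mask_extent) := by unfold Pre_deboor_to_bezier_knot_mask; infer_instance

def pvWitness_deboor_to_bezier_knot_mask : List Int × Int := ([3, 4, 5], 2)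

def Spec_deboor_to_bezier_knot_mask (top_index : List Int) (mask_extent : Int) (out : List (List Int)) : Prop := out = deboor_to_bezier_knot_mask_alt top_index mask_extent
instance (top_index : List Int) (mask_extent : Int) (out : List (List Int)) : Decidable (Spec_deboor_to_bezier_knot_mask top_index mask_extent out) := by unfold Spec_deboor_to_bezier_knot_mask; infer_instance

-- ===== CLAIM (what is proved, stated in full; the proofs are below) =====
def Claim_equal_deboor_to_bezier_knot_mask : Prop := ∀ (top_index : List Int) (mask_extent : Int), Dom_deboor_to_bezier_knot_mask top_index mask_extent → Pre_deboor_to_bezier_knot_mask top_index mask_extent → Spec_deboor_to_bezier_knot_mask top_index mask_extent (deboor_to_bezier_knot_mask top_index mask_extent)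

-- ===== LEMMAS AND PROOFS =====

theorem flatMap_congr_mem {α β : Type} (l : List α) (f g : α → List β)
    (h : ∀ a ∈ l, f a = g a) : l.flatMap f = l.flatMap g := by
  induction l with
  | nil => rfl
  | cons x xs ih =>
    simp only [List.flatMap_cons]
    rw [h x (List.mem_cons_self), ih (fun a ha => h a (List.mem_cons_of_mem x ha))]

theorem addAt_zero (l : List Int) (i : Int) : addAt l i 0 = l := by
  induction l generalizing i with
  | nil => rfl
  | cons x xs ih => simp only [addAt]; split <;> simp [ih]

theorem addAt_addAt (l : List Int) (i v w : Int) :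
    addAt (addAt l i v) i w = addAt l i (v + w) := by
  induction l generalizing i with
  | nil => rfl
  | cons x xs ih =>
    by_cases h : i = 0
    · simp [addAt, h]; ring
    · simp [addAt, h, ih]

theorem incAt_eq_addAt (l : List Int) (i : Int) : incAt l i = addAt l i 1 := by
  induction l generalizing i with
  | nil => rfl
  | cons x xs ih => simp only [incAt, addAt]; split <;> simp [ih]

theorem foldl_incAt_replicate (r : Nat) (base : List Int) (p : Int) :
    (List.replicate r p).foldl incAt base = addAt base p (r : Int) := by
  induction r generalizing base with
  | zero => simp [addAt_zero]
  | succ n ih =>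
    rw [List.replicate_succ, List.foldl_cons, ih, incAt_eq_addAt, addAt_addAt]
    congr 1
    push_cast
    ring

theorem cwr_singleton {α : Type} (x : α) (r : Nat) :
    cwr [x] r = [List.replicate r x] := by
  induction r with
  | zero => simp [cwr]
  | succ n ih => rw [cwr, ih, cwr]; simp [List.replicate_succ]

theorem reverse_range (n : Nat) :
    (List.range n).reverse = (List.range n).map (fun k => n - 1 - k) := by
  induction n with
  | zero => rfl
  | succ n ih =>
    have lhs : (List.range (n + 1)).reverse
        = n :: List.map (fun k => n - 1 - k) (List.range n) := by
      rw [List.range_succ, List.reverse_append, ih]; rfl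
    have rhs : List.map (fun k => n + 1 - 1 - k) (List.range (n + 1))
        = n :: List.map (fun k => n - 1 - k) (List.range n) := by
      rw [List.range_succ_eq_map]
      simp [List.map_map, Function.comp, Nat.sub_sub, Nat.add_comm]
    rw [lhs, rhs]

theorem cwr_cons_decomp {α : Type} (x : α) (rest : List α) (r : Nat) :
    cwr (x :: rest) r =
      ((List.range (r + 1)).reverse).flatMap
        (fun c => (cwr rest (r - c)).map (fun t => List.replicate c x ++ t)) := by
  induction r with
  | zero => simp [cwr]
  | succ n ih =>
    rw [cwr, ih, List.map_flatMap]
    have hrev : (List.range (n + 1 + 1)).reverse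
        = ((List.range (n + 1)).reverse).map (fun c => c + 1) ++ [0] := by
      rw [List.range_succ_eq_map, List.reverse_cons, List.map_reverse]
    rw [hrev, List.flatMap_append, List.flatMap_map]
    congr 1
    · apply flatMap_congr_mem
      intro c _
      simp [List.map_map, Function.comp, List.replicate_succ, Nat.succ_sub_succ]
    · simp

-- the central bridge: B's count-per-position recursion enumerates exactly A's
-- combinations_with_replacement images, in the same order
theorem distribute_eq_cwr (k : Nat) :
    ∀ (base : List Int) (pos remaining : Int),
      (((base.length : Int) + 1 - pos)).toNat ≤ k → 0 ≤ pos → 0 ≤ remaining →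
      distribute base pos remaining =
        (cwr (PySem.List.pyRange pos (base.length : Int) 1) remaining.toNat).map
          (fun comb => comb.foldl incAt base) := by
  induction k with
  | zero =>
    intro base pos remaining hk hpos hrem
    rw [distribute]
    have hle : (base.length : Int) ≤ pos := by omega
    rw [dif_pos hle, PySem.List.pyRange_one_eq_nil hle]
    by_cases h0 : remaining = 0
    · subst h0; simp [cwr]
    · have hne : remaining.toNat ≠ 0 := by omega
      rw [if_neg h0]
      obtain ⟨s, hs⟩ := Nat.exists_eq_succ_of_ne_zero hne
      rw [hs, cwr]
      rfl
  | succ k ih =>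
    intro base pos remaining hk hpos hrem
    rw [distribute]
    by_cases hle : (base.length : Int) ≤ pos
    · rw [dif_pos hle, PySem.List.pyRange_one_eq_nil hle]
      by_cases h0 : remaining = 0
      · subst h0; simp [cwr]
      · have hne : remaining.toNat ≠ 0 := by omega
        rw [if_neg h0]
        obtain ⟨s, hs⟩ := Nat.exists_eq_succ_of_ne_zero hne
        rw [hs, cwr]
        rfl
    · rw [dif_neg hle]
      by_cases hlast : pos = (base.length : Int) - 1
      · rw [if_pos hlast]
        have hcons : PySem.List.pyRange pos (base.length : Int) 1 = [pos] := by
          have hlen : (base.length : Int) = pos + 1 := by omega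
          rw [hlen]
          exact PySem.List.pyRange_one_singleton pos
        rw [hcons, cwr_singleton, List.map_singleton, foldl_incAt_replicate,
          Int.toNat_of_nonneg hrem]
      · rw [if_neg hlast]
        -- LHS: fold over the countdown range, as a flatMap over range
        rw [PySem.List.foldl_append_eq_flatMap, List.nil_append,
          PySem.List.pyRange_neg_one]
        have hcnt : (remaining - -1).toNat = remaining.toNat + 1 := by omega
        rw [hcnt, List.flatMap_map]
        -- RHS: peel off the head position and decompose cwr
        have hposlt : pos < (base.length : Int) := by omega
        rw [PySem.List.pyRange_one_cons hposlt, cwr_cons_decomp, List.map_flatMap,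
          reverse_range, List.flatMap_map, Nat.add_sub_cancel]
        apply flatMap_congr_mem
        intro c hc
        rw [List.mem_range] at hc
        have hc' : c ≤ remaining.toNat := by omega
        have hkk : remaining - (remaining - (c : Int)) = (c : Int) := by ring
        rw [hkk, ih (addAt base pos (remaining - (c : Int))) (pos + 1) (c : Int)
          (by rw [addAt_length]; omega) (by omega) (by positivity)]
        rw [addAt_length, Int.toNat_natCast]
        have hsub : remaining.toNat - (remaining.toNat - c) = c := by omega
        rw [hsub, List.map_map]
        apply List.map_congr_left
        intro t _
        simp only [Function.comp]
        rw [List.foldl_append, foldl_incAt_replicate]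
        have harg : ((remaining.toNat - c : Nat) : Int) = remaining - (c : Int) := by omega
        rw [harg]

-- ===== VERDICT (by name: the statement is the Claim_ definition above) =====
theorem deboor_to_bezier_knot_mask_spec : Claim_equal_deboor_to_bezier_knot_mask := by
  intro top_index mask_extent _hdom hpre
  unfold Spec_deboor_to_bezier_knot_mask
  unfold deboor_to_bezier_knot_mask deboor_to_bezier_knot_mask_alt
  rcases hpre with hne | hle
  · -- top_index nonempty: the per-depth bodies agree
    apply PySem.List.foldl_congr_mem
    intro acc depth hmem
    rw [PySem.List.mem_pyRange_one] at hmem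
    obtain ⟨t, ts, rfl⟩ := List.exists_cons_of_ne_nil hne
    simp only []
    rw [PySem.List.foldl_append_singleton_eq_map]
    congr 1
    have hlen : (((t - depth) :: ts).length : Int) = ((t :: ts).length : Int) := by simp
    rw [distribute_eq_cwr ((((t - depth) :: ts).length : Int) + 1 - 1).toNat
      ((t - depth) :: ts) 1 depth (le_refl _) (by omega) (by omega)]
    rw [hlen]
  · -- mask_extent ≤ 0: the loop never runs in either version
    rw [show PySem.List.pyRange 1 (mask_extent + 1) 1 = [] from
      PySem.List.pyRange_one_eq_nil (by omega)]
    rfl
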